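-- pv_equiv track=rewrite | github.com/anxmeshhh/Agent_Route_AI | app/agents/news_agent.py | _score_articles
-- ===== SOURCE A (Python) =====
-- RISK_KEYWORDS = {
--     "CRITICAL": ["strike", "blockade", "war", "conflict", "explosion", "fire", "closure"],
--     "HIGH":     ["protest", "sanctions", "storm", "hurricane", "typhoon", "flood", "shutdown"],
--     "MEDIUM":   ["delay", "congestion", "disruption", "accident", "collision", "traffic"],
--     "LOW":      ["inspection", "maintenance", "slow", "queue", "customs"],
-- }
--
-- SEVERITY_SCORE = {"CRITICAL": 12, "HIGH": 8, "MEDIUM": 4, "LOW": 2}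
--
-- def _score_articles(articles: list, search_term: str) -> tuple[list, int]:
--     signals = []
--     total   = 0
--
--     for a in articles[:10]:
--         text = f"{a.get('title','')} {a.get('description','')}".lower()
--         best_sev   = None
--         best_kw    = None
--         best_score = 0
--
--         for sev, keywords in RISK_KEYWORDS.items():
--             for kw in keywords:
--                 if kw in text:
--                     pts = SEVERITY_SCORE[sev]
--                     if pts > best_score:
--                         best_score = pts
--                         best_sev   = sev
--                         best_kw    = kw
--
--         if best_sev:
--             signals.append({
--                 "type":     "news",
--                 "title":    a.get("title", "Unknown headline")[:120],
--                 "detail":   f"Source: {a.get('source','Unknown')} · Keyword: {best_kw}",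
--                 "severity": best_sev,
--                 "url":      a.get("url", ""),
--                 "published":a.get("published", ""),
--             })
--             total = min(total + best_score // 2, 35)
--
--     return signals[:5], min(total, 35)
-- ===== SOURCE B (Python) =====
-- RISK_KEYWORDS = {
--     "CRITICAL": ["strike", "blockade", "war", "conflict", "explosion", "fire", "closure"],
--     "HIGH":     ["protest", "sanctions", "storm", "hurricane", "typhoon", "flood", "shutdown"],
--     "MEDIUM":   ["delay", "congestion", "disruption", "accident", "collision", "traffic"],
--     "LOW":      ["inspection", "maintenance", "slow", "queue", "customs"],
-- }
--
-- SEVERITY_SCORE = {"CRITICAL": 12, "HIGH": 8, "MEDIUM": 4, "LOW": 2}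
--
--
-- def _score_articles(articles: list, search_term: str) -> tuple[list, int]:
--     # Pipeline: collect (article, severity, keyword) hits by scanning severities in
--     # priority order with an early break, then derive signals and total from the hits.
--     hits = []
--     for a in articles[:10]:
--         text = f"{a.get('title','')} {a.get('description','')}".lower()
--         for sev in ("CRITICAL", "HIGH", "MEDIUM", "LOW"):
--             kw = next((k for k in RISK_KEYWORDS[sev] if k in text), None)
--             if kw is not None:
--                 hits.append((a, sev, kw))
--                 break
--
--     signals = [
--         {
--             "type":     "news",
--             "title":    a.get("title", "Unknown headline")[:120],
--             "detail":   f"Source: {a.get('source','Unknown')} · Keyword: {kw}",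
--             "severity": sev,
--             "url":      a.get("url", ""),
--             "published": a.get("published", ""),
--         }
--         for a, sev, kw in hits[:5]
--     ]
--
--     total = 0
--     for _, sev, _ in hits:
--         total = min(total + SEVERITY_SCORE[sev] // 2, 35)
--
--     return signals, min(total, 35)
-- ===== Notes on version B (the rewrite author's own statement) =====
-- stated objective: simpler
-- what changed: Replaces the exhaustive scan of all 25 keywords with running-max tracking by a pipeline: scan severities in strictly decreasing priority order, take the first keyword hit per article with an early break (valid because severity scores strictly decrease in iteration order), collect the hits, then derive the signal list and the capped total from the hit list in separate passes.
import Mathlib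
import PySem

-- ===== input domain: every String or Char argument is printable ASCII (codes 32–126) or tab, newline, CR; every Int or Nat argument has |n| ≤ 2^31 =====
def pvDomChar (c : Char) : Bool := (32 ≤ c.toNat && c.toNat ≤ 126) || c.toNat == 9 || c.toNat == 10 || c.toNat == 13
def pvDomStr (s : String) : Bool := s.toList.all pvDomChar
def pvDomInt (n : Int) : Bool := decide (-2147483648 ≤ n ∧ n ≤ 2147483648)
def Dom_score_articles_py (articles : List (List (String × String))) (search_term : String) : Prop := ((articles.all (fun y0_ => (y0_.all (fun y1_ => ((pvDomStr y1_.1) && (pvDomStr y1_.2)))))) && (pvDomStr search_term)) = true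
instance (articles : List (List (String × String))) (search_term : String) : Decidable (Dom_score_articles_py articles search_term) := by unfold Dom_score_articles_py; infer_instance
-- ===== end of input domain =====

-- B replaces A's exhaustive max-tracking keyword scan with a priority-ordered early-break hit
-- pipeline (hits list, then signals and total derived from it): simpler decomposition, same results.

-- ===== PORT A =====
-- shared module constants (RISK_KEYWORDS in insertion order, SEVERITY_SCORE)
def pvRiskKeywords : List (String × List String) :=
  [("CRITICAL", ["strike", "blockade", "war", "conflict", "explosion", "fire", "closure"]),
   ("HIGH",     ["protest", "sanctions", "storm", "hurricane", "typhoon", "flood", "shutdown"]),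
   ("MEDIUM",   ["delay", "congestion", "disruption", "accident", "collision", "traffic"]),
   ("LOW",      ["inspection", "maintenance", "slow", "queue", "customs"])]

def pvSeverityScore : List (String × Int) :=
  [("CRITICAL", 12), ("HIGH", 8), ("MEDIUM", 4), ("LOW", 2)]

-- SEVERITY_SCORE[sev]; the default 0 is unreachable: every sev passed comes from pvRiskKeywords
def pvSevScore (s : String) : Int :=
  match pvSeverityScore.find? (fun p => p.1 == s) with
  | some p => p.2
  | none => 0

-- a.get(k, d) on a Python dict = first-match lookup in the association list
def pvGet (a : List (String × String)) (k d : String) : String :=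
  match a.find? (fun p => p.1 == k) with
  | some p => p.2
  | none => d

-- text = f"{a.get('title','')} {a.get('description','')}".lower()  (f-string concat on List Char, exact for this domain)
def pvText (a : List (String × String)) : List Char :=
  PySem.Chars.lower ((pvGet a "title" "").toList ++ [' '] ++ (pvGet a "description" "").toList)

-- the signal dict literal, in insertion order (identical in both Pythons)
def pvSignal (a : List (String × String)) (sev kw : String) : List (String × String) :=
  [("type", "news"),
   ("title", PySem.Str.slice (pvGet a "title" "Unknown headline") none (some 120)),
   ("detail", String.ofList ("Source: ".toList ++ (pvGet a "source" "Unknown").toList ++ " · Keyword: ".toList ++ kw.toList)),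
   ("severity", sev),
   ("url", pvGet a "url" ""),
   ("published", pvGet a "published" "")]

-- A's inner double loop: running max over all severities and keywords
def pvBestA (text : List Char) : Int × Option String × Option String :=
  pvRiskKeywords.foldl
    (fun b p =>
      p.2.foldl
        (fun (b : Int × Option String × Option String) kw =>
          if PySem.Chars.isIn kw.toList text && decide (b.1 < pvSevScore p.1)
          then (pvSevScore p.1, some p.1, some kw) else b)
        b)
    (0, none, none)

-- A's loop body: append the signal and bump the capped total when a keyword matched
def pvStepA (st : List (List (String × String)) × Int) (a : List (String × String)) :
    List (List (String × String)) × Int :=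
  let text := pvText a
  let best := pvBestA text
  match best.2.1, best.2.2 with
  | some sev, some kw =>
      (st.1 ++ [pvSignal a sev kw], min (st.2 + PySem.Int.floordiv best.1 2) 35)
  | _, _ => st

def score_articles_py (articles : List (List (String × String))) (search_term : String) :
    (List (List (String × String))) × Int :=
  let r := (PySem.List.slice articles none (some 10)).foldl pvStepA ([], 0)
  (PySem.List.slice r.1 none (some 5), min r.2 35)

-- ===== PORT B =====
-- next((k for k in kws if k in text), None)
def pvFindKw (text : List Char) (kws : List String) : Option String :=
  kws.find? (fun kw => PySem.Chars.isIn kw.toList text)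

-- the severity loop with its early break: first severity (in priority order) with a hit
def pvFirstHit (text : List Char) : List (String × List String) → Option (String × String)
  | [] => none
  | (sev, kws) :: rest =>
      match pvFindKw text kws with
      | some kw => some (sev, kw)
      | none => pvFirstHit text rest

-- the hits-collecting loop of B
def pvStepB (hs : List ((List (String × String)) × String × String)) (a : List (String × String)) :
    List ((List (String × String)) × String × String) :=
  match pvFirstHit (pvText a) pvRiskKeywords with
  | some (sev, kw) => hs ++ [(a, sev, kw)]
  | none => hs

def score_articles_py_alt (articles : List (List (String × String))) (search_term : String) :
    (List (List (String × String))) × Int :=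
  let hits := (PySem.List.slice articles none (some 10)).foldl pvStepB []
  let signals := (PySem.List.slice hits none (some 5)).map (fun h => pvSignal h.1 h.2.1 h.2.2)
  let total := hits.foldl (fun t h => min (t + PySem.Int.floordiv (pvSevScore h.2.1) 2) 35) 0
  (signals, min total 35)

-- ===== PRECONDITION & SPEC =====
def Spec_score_articles_py (articles : List (List (String × String))) (search_term : String) (out : (List (List (String × String))) × Int) : Prop := out = score_articles_py_alt articles search_term
instance (articles : List (List (String × String))) (search_term : String) (out : (List (List (String × String))) × Int) : Decidable (Spec_score_articles_py articles search_term out) := by unfold Spec_score_articles_py; infer_instance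

-- ===== CLAIM (what is proved, stated in full; the proofs are below) =====
def Claim_equal_score_articles_py : Prop := ∀ (articles : List (List (String × String))) (search_term : String), Dom_score_articles_py articles search_term → Spec_score_articles_py articles search_term (score_articles_py articles search_term)

-- ===== LEMMAS AND PROOFS =====

-- the per-article hit delta: [] or one hit
def pvDelta (a : List (String × String)) : List ((List (String × String)) × String × String) :=
  match pvFirstHit (pvText a) pvRiskKeywords with
  | some (sev, kw) => [(a, sev, kw)]
  | none => []

-- A's inner keyword loop is a no-op once the stored best score is ≥ this severity's score
theorem pvInner_stuck (text : List Char) (pts : Int) (sev : String) (kws : List String)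
    (b : Int × Option String × Option String) (h : ¬ b.1 < pts) :
    kws.foldl
      (fun (b : Int × Option String × Option String) kw =>
        if PySem.Chars.isIn kw.toList text && decide (b.1 < pts)
        then (pts, some sev, some kw) else b) b = b := by
  induction kws with
  | nil => rfl
  | cons k ks ih =>
      simp only [List.foldl_cons]
      rw [if_neg (by simp [h]), ih]

-- from the fresh state, A's inner loop picks exactly the first matching keyword
theorem pvInner_fresh (text : List Char) (pts : Int) (sev : String) (kws : List String)
    (h : (0 : Int) < pts) :
    kws.foldl
      (fun (b : Int × Option String × Option String) kw =>
        if PySem.Chars.isIn kw.toList text && decide (b.1 < pts)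
        then (pts, some sev, some kw) else b) ((0 : Int), none, none) =
      (match pvFindKw text kws with
       | some kw => (pts, some sev, some kw)
       | none => ((0 : Int), none, none)) := by
  induction kws with
  | nil => rfl
  | cons k ks ih =>
      simp only [List.foldl_cons, pvFindKw, List.find?_cons]
      cases hin : PySem.Chars.isIn k.toList text with
      | true =>
          rw [if_pos (by simp [h]),
            pvInner_stuck text pts sev ks (pts, some sev, some k) (lt_irrefl pts)]
      | false =>
          rw [if_neg (by simp)]
          simpa [pvFindKw] using ih

-- A's outer severity loop is a no-op once the stored best score beats all remaining severities
theorem pvOuter_stuck (text : List Char) (L : List (String × List String))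
    (b : Int × Option String × Option String) (h : ∀ p ∈ L, pvSevScore p.1 ≤ b.1) :
    L.foldl
      (fun b p =>
        p.2.foldl
          (fun (b : Int × Option String × Option String) kw =>
            if PySem.Chars.isIn kw.toList text && decide (b.1 < pvSevScore p.1)
            then (pvSevScore p.1, some p.1, some kw) else b) b) b = b := by
  induction L with
  | nil => rfl
  | cons p ps ih =>
      simp only [List.foldl_cons]
      rw [pvInner_stuck text (pvSevScore p.1) p.1 p.2 b
          (by have := h p (List.mem_cons_self ..); omega)]
      exact ih (fun q hq => h q (List.mem_cons_of_mem _ hq))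

-- with strictly decreasing positive scores, A's max-tracking scan equals B's early-break selection
theorem pvOuter_sel (text : List Char) (L : List (String × List String))
    (h1 : ∀ p ∈ L, 0 < pvSevScore p.1)
    (h2 : L.Pairwise (fun p q => pvSevScore q.1 < pvSevScore p.1)) :
    L.foldl
      (fun b p =>
        p.2.foldl
          (fun (b : Int × Option String × Option String) kw =>
            if PySem.Chars.isIn kw.toList text && decide (b.1 < pvSevScore p.1)
            then (pvSevScore p.1, some p.1, some kw) else b) b) ((0 : Int), none, none) =
      (match pvFirstHit text L with
       | some (sev, kw) => (pvSevScore sev, some sev, some kw)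
       | none => ((0 : Int), none, none)) := by
  induction L with
  | nil => rfl
  | cons p ps ih =>
      obtain ⟨sev, kws⟩ := p
      simp only [List.foldl_cons, pvFirstHit]
      rw [pvInner_fresh text (pvSevScore sev) sev kws (h1 (sev, kws) (List.mem_cons_self ..))]
      cases hfk : pvFindKw text kws with
      | some kw =>
          exact pvOuter_stuck text ps _
            (fun q hq => le_of_lt ((List.pairwise_cons.mp h2).1 q hq))
      | none =>
          exact ih (fun q hq => h1 q (List.mem_cons_of_mem _ hq)) (List.pairwise_cons.mp h2).2

theorem pvBestA_eq (text : List Char) :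
    pvBestA text =
      (match pvFirstHit text pvRiskKeywords with
       | some (sev, kw) => (pvSevScore sev, some sev, some kw)
       | none => ((0 : Int), none, none)) := by
  exact pvOuter_sel text pvRiskKeywords (by decide) (by decide)

-- A's loop body rewritten through the hit delta
theorem pvStepA_eq (st : List (List (String × String)) × Int) (a : List (String × String)) :
    pvStepA st a =
      (st.1 ++ (pvDelta a).map (fun h => pvSignal h.1 h.2.1 h.2.2),
       (pvDelta a).foldl (fun t h => min (t + PySem.Int.floordiv (pvSevScore h.2.1) 2) 35) st.2) := by
  cases h : pvFirstHit (pvText a) pvRiskKeywords with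
  | none => simp [pvStepA, pvDelta, pvBestA_eq, h]
  | some p => obtain ⟨sev, kw⟩ := p; simp [pvStepA, pvDelta, pvBestA_eq, h]

-- B's hit loop body through the same delta
theorem pvStepB_eq (hs : List ((List (String × String)) × String × String)) (a : List (String × String)) :
    pvStepB hs a = hs ++ pvDelta a := by
  unfold pvStepB pvDelta
  cases h : pvFirstHit (pvText a) pvRiskKeywords with
  | none => simp
  | some p => obtain ⟨sev, kw⟩ := p; simp

-- A's whole article loop, characterised by the flattened hit list
theorem pvFoldA (as : List (List (String × String)))
    (s0 : List (List (String × String))) (t0 : Int) :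
    as.foldl pvStepA (s0, t0) =
      (s0 ++ (as.flatMap pvDelta).map (fun h => pvSignal h.1 h.2.1 h.2.2),
       (as.flatMap pvDelta).foldl (fun t h => min (t + PySem.Int.floordiv (pvSevScore h.2.1) 2) 35) t0) := by
  induction as generalizing s0 t0 with
  | nil => simp
  | cons a as ih =>
      rw [List.foldl_cons, pvStepA_eq, ih]
      simp [List.foldl_append]

-- B's hit loop, characterised by the same flattened hit list
theorem pvFoldB (as : List (List (String × String)))
    (hs0 : List ((List (String × String)) × String × String)) :
    as.foldl pvStepB hs0 = hs0 ++ as.flatMap pvDelta := by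
  induction as generalizing hs0 with
  | nil => simp
  | cons a as ih => rw [List.foldl_cons, pvStepB_eq, ih]; simp

-- ===== VERDICT (by name: the statement is the Claim_ definition above) =====
theorem score_articles_py_spec : Claim_equal_score_articles_py := by
  intro articles search_term _
  unfold Spec_score_articles_py
  simp only [score_articles_py, score_articles_py_alt, pvFoldA, pvFoldB, List.nil_append]
  rw [PySem.List.slice_to _ (by norm_num), PySem.List.slice_to _ (by norm_num),
    PySem.List.slice_to _ (by norm_num)]
  simp [List.map_take]
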